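-- pv_equiv track=rewrite | github.com/thwee-alchemist/EightQueens.py | EightQueens.py | up_right_boundary
-- ===== SOURCE A (Python) =====
-- def up_right_boundary(pos):
-- 	boundary = pos
-- 	while ((boundary+1)%8) != 0:
-- 		boundary -= 7
--
-- 	if boundary < 6:
-- 		boundary = 6
--
-- 	boundary -= 1
--
-- 	applies = pos%8>=pos%7
--
-- 	if applies:
-- 		return boundary
-- 	else:
-- 		return -1
-- ===== SOURCE B (Python) =====
-- def up_right_boundary(pos):
--     k = (7 - pos) % 8
--     boundary = pos - 7 * k
--     if boundary < 6:
--         boundary = 6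
--     boundary -= 1
--     applies = pos % 8 >= pos % 7
--     return boundary if applies else -1
-- ===== Notes on version B (the rewrite author's own statement) =====
-- stated objective: simpler
-- what changed: Replaces A's while loop (repeatedly subtracting 7 until boundary is 7 mod 8) with the closed form boundary = pos - 7*((7-pos) % 8); the clamp and the applies test are unchanged.
import Mathlib
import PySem

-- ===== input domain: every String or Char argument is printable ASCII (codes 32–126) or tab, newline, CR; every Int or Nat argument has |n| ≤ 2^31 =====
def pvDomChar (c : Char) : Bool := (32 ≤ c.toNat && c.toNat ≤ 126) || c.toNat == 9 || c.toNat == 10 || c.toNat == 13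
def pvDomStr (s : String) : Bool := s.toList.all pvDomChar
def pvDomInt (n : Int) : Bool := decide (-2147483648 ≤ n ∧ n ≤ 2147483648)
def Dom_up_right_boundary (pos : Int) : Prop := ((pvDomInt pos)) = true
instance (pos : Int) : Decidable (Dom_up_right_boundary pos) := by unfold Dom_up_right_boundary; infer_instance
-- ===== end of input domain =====

-- B replaces A's while loop by the closed form boundary = pos - 7*((7-pos) % 8); objective: simpler.

-- ===== PORT A =====
-- the while loop of A: while (boundary+1)%8 != 0: boundary -= 7
def upRightLoopA (b : Int) : Int :=
  if PySem.Int.mod (b + 1) 8 ≠ 0 then upRightLoopA (b - 7) else b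
  termination_by (((7 - b) % 8)).toNat
  decreasing_by
    rename_i h
    rw [PySem.Int.mod_eq_emod_of_pos (by norm_num : (0:Int) < 8)] at h
    omega

def up_right_boundary (pos : Int) : Int :=
  let boundary := upRightLoopA pos
  let boundary := if boundary < 6 then 6 else boundary
  let boundary := boundary - 1
  let applies := PySem.Int.mod pos 8 ≥ PySem.Int.mod pos 7
  if applies then boundary else -1

-- ===== PORT B =====
def up_right_boundary_alt (pos : Int) : Int :=
  let k := PySem.Int.mod (7 - pos) 8
  let boundary := pos - 7 * k
  let boundary := if boundary < 6 then 6 else boundary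
  let boundary := boundary - 1
  let applies := PySem.Int.mod pos 8 ≥ PySem.Int.mod pos 7
  if applies then boundary else -1

-- ===== PRECONDITION & SPEC =====
def Spec_up_right_boundary (pos : Int) (out : Int) : Prop := out = up_right_boundary_alt pos
instance (pos : Int) (out : Int) : Decidable (Spec_up_right_boundary pos out) := by unfold Spec_up_right_boundary; infer_instance

-- ===== CLAIM (what is proved, stated in full; the proofs are below) =====
def Claim_equal_up_right_boundary : Prop := ∀ (pos : Int), Dom_up_right_boundary pos → Spec_up_right_boundary pos (up_right_boundary pos)

-- ===== LEMMAS AND PROOFS =====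
theorem upRightLoopA_eq (b : Int) : upRightLoopA b = b - 7 * (((7 - b) % 8)) := by
  fun_induction upRightLoopA b with
  | case1 b h ih =>
      rw [ih]
      rw [PySem.Int.mod_eq_emod_of_pos (by norm_num : (0:Int) < 8)] at h
      omega
  | case2 b h =>
      rw [PySem.Int.mod_eq_emod_of_pos (by norm_num : (0:Int) < 8)] at h
      omega

-- ===== VERDICT (by name: the statement is the Claim_ definition above) =====
theorem up_right_boundary_spec : Claim_equal_up_right_boundary := by
  intro pos _
  unfold Spec_up_right_boundary up_right_boundary up_right_boundary_alt
  rw [upRightLoopA_eq,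
    PySem.Int.mod_eq_emod_of_pos (b := 8) (by norm_num) (a := 7 - pos)]
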